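-- pv_equiv track=rewrite | github.com/TAbdiukov/rfcvoip | pyVoIP/Telemetry.py | _call_state_summary
-- ===== SOURCE A (Python) =====
-- from typing import Any, Dict, Iterable, List, Optional, Tuple, Union
--
-- _TELEGRAM_V2_SPECIALS = r"_*[]()~`>#+-=|{}.!"
--
-- def _telegram_escape(text: str) -> str:
--     return "".join("\\" + ch if ch in _TELEGRAM_V2_SPECIALS else ch for ch in text)
--
-- def _text(text: Any, platform: str) -> str:
--     value = str(text)
--     return _telegram_escape(value) if platform.startswith("telegram") else value
--
-- def _code(value: Any, platform: str) -> str: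
--     text_value = "None" if value is None else str(value)
--     if platform.startswith("telegram"):
--         text_value = text_value.replace("\\", "\\\\").replace("`", "\\`")
--     else:
--         text_value = text_value.replace("`", "'")
--     return f"`{text_value}`"
--
-- def _call_state_summary(calls: List[Dict[str, Any]], platform: str) -> str:
--     if not calls:
--         return _code("0", platform)
--     counts: Dict[str, int] = {}
--     for call in calls:
--         state = str(call.get("state") or "UNKNOWN")
--         counts[state] = counts.get(state, 0) + 1
--     parts = [_code(str(len(calls)), platform)]
--     parts.extend(
--         f"{_code(state, platform)} {_text('x', platform)} {_code(count, platform)}"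
--         for state, count in sorted(counts.items())
--     )
--     return _text(" | ", platform).join(parts)
-- ===== SOURCE B (Python) =====
-- _TELEGRAM_V2_SPECIALS = r"_*[]()~`>#+-=|{}.!"
--
-- def _telegram_escape(text: str) -> str:
--     return "".join("\\" + ch if ch in _TELEGRAM_V2_SPECIALS else ch for ch in text)
--
-- def _text(text, platform: str) -> str:
--     value = str(text)
--     return _telegram_escape(value) if platform.startswith("telegram") else value
--
-- def _code(value, platform: str) -> str:
--     text_value = "None" if value is None else str(value)
--     if platform.startswith("telegram"):
--         text_value = text_value.replace("\\", "\\\\").replace("`", "\\`")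
--     else:
--         text_value = text_value.replace("`", "'")
--     return f"`{text_value}`"
--
-- def _runs(states):
--     # states is sorted: scan maximal runs of equal values, front to back
--     out = []
--     i = 0
--     n = len(states)
--     while i < n:
--         j = i + 1
--         while j < n and states[j] == states[i]:
--             j += 1
--         out.append((states[i], j - i))
--         i = j
--     return out
--
-- def _call_state_summary(calls, platform: str) -> str:
--     if not calls:
--         return _code("0", platform)
--     states = sorted(str(call.get("state") or "UNKNOWN") for call in calls)
--     parts = [_code(str(len(calls)), platform)]
--     for state, count in _runs(states):
--         parts.append(
--             f"{_code(state, platform)} {_text('x', platform)} {_code(count, platform)}"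
--         )
--     return _text(" | ", platform).join(parts)
-- ===== Notes on version B (the rewrite author's own statement) =====
-- stated objective: alternative
-- what changed: Replaces the dict tally (counts.get/counts[state]+=1 then sorted(counts.items())) with a sort-then-group-runs traversal: sort the whole normalized state list (with duplicates) and do one run-length scan over it, emitting each maximal run as (state, run length); no dictionary or counter is maintained.
import Mathlib
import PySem

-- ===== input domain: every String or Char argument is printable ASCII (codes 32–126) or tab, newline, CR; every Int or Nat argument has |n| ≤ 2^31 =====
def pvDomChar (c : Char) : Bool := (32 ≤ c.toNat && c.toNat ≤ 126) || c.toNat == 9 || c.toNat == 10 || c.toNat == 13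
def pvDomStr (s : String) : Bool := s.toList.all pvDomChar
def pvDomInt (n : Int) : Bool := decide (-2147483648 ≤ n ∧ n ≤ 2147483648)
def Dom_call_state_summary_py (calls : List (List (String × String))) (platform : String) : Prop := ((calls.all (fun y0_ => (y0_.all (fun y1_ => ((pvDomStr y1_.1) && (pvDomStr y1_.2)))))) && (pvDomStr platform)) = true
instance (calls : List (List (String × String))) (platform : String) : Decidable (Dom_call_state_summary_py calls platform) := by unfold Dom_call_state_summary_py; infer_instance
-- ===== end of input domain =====

-- B replaces A's dict tally + sorted(items) with a sort-then-group-runs traversal: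
-- sort the full normalized state list and emit one entry per maximal run; same value everywhere.

-- ===== shared module helpers (_telegram_escape, _text, _code and the f-string entry,
-- identical lines of context in both Pythons) =====
def pvSpecials : List Char := "_*[]()~`>#+-=|{}.!".toList

def pv_telegram_escape (s : String) : String :=
  PySem.Str.join "" (s.toList.map (fun ch =>
    if pvSpecials.contains ch then String.ofList ['\\', ch] else String.ofList [ch]))

def pv_text (t : String) (platform : String) : String :=
  if PySem.Str.startswith platform "telegram" then pv_telegram_escape t else t

def pv_code (v : String) (platform : String) : String :=
  let tv := if PySem.Str.startswith platform "telegram" then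
      PySem.Str.replace (PySem.Str.replace v "\\" "\\\\") "`" "\\`"
    else PySem.Str.replace v "`" "'"
  PySem.Str.join "" ["`", tv, "`"]

-- str(call.get("state") or "UNKNOWN")  (None and "" are falsy)
def pvState (call : List (String × String)) : String :=
  match (PySem.Dict.mk call).get? "state" with
  | none => "UNKNOWN"
  | some s => if s = "" then "UNKNOWN" else s

-- f"{_code(state, platform)} {_text('x', platform)} {_code(count, platform)}"
def pvEntry (state : String) (count : Int) (platform : String) : String :=
  PySem.Str.join " " [pv_code state platform, pv_text "x" platform,
    pv_code (PySem.Int.toStr count) platform]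

-- ===== PORT A =====
def call_state_summary_py (calls : List (List (String × String))) (platform : String) : String :=
  if calls = [] then pv_code "0" platform
  else
    let counts : PySem.Dict String Int :=
      calls.foldl (fun d call =>
        let state := pvState call
        d.insert state (d.getD state 0 + 1)) PySem.Dict.empty
    let parts := pv_code (PySem.Int.toStr calls.length) platform ::
      (PySem.List.sorted2 counts.items Prod.fst Prod.snd).map
        (fun p => pvEntry p.1 p.2 platform)
    PySem.Str.join (pv_text " | " platform) parts

-- ===== PORT B =====
-- _runs: the outer while loop is recursion on the remaining suffix; the inner
-- 'while j < n and states[j] == states[i]' counting is length of the equal prefix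
-- of the tail (takeWhile), exact on every list.
def pvRuns : List String → List (String × Int)
  | [] => []
  | s :: t =>
    (s, ((t.takeWhile (fun x => x == s)).length : Int) + 1) ::
      pvRuns (t.dropWhile (fun x => x == s))
  termination_by l => l.length
  decreasing_by simpa using Nat.lt_succ_of_le (t.length_dropWhile_le _)

def call_state_summary_py_alt (calls : List (List (String × String))) (platform : String) : String :=
  if calls = [] then pv_code "0" platform
  else
    let states := PySem.List.sorted (calls.map pvState) (fun x => x)
    let parts := pv_code (PySem.Int.toStr calls.length) platform ::
      (pvRuns states).map (fun p => pvEntry p.1 p.2 platform)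
    PySem.Str.join (pv_text " | " platform) parts

-- ===== PRECONDITION & SPEC =====
def Spec_call_state_summary_py (calls : List (List (String × String))) (platform : String) (out : String) : Prop := out = call_state_summary_py_alt calls platform
instance (calls : List (List (String × String))) (platform : String) (out : String) : Decidable (Spec_call_state_summary_py calls platform out) := by unfold Spec_call_state_summary_py; infer_instance

-- ===== CLAIM (what is proved, stated in full; the proofs are below) =====
def Claim_equal_call_state_summary_py : Prop := ∀ (calls : List (List (String × String))) (platform : String), Dom_call_state_summary_py calls platform → Spec_call_state_summary_py calls platform (call_state_summary_py calls platform)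

-- ===== LEMMAS AND PROOFS =====

-- insertBy commutes with a map whose predicate corresponds
theorem pv_insertBy_map {α β : Type} (f : α → β) (p : β → β → Bool) (q : α → α → Bool)
    (h : ∀ a b, p (f a) (f b) = q a b) (x : α) :
    ∀ (ys : List α), PySem.List.insertBy p (f x) (ys.map f) = (PySem.List.insertBy q x ys).map f := by
  intro ys
  induction ys with
  | nil => simp [PySem.List.insertBy]
  | cons y t ih =>
    simp only [List.map_cons, PySem.List.insertBy, h]
    by_cases hq : q x y = true
    · simp [hq]
    · simp [hq, ih]

theorem pv_foldl_insertBy_map {α β : Type} (f : α → β) (p : β → β → Bool) (q : α → α → Bool)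
    (h : ∀ a b, p (f a) (f b) = q a b) :
    ∀ (ks : List α) (acc : List α),
      (ks.map f).foldl (fun r x => PySem.List.insertBy p x r) (acc.map f)
        = (ks.foldl (fun r x => PySem.List.insertBy q x r) acc).map f := by
  intro ks
  induction ks with
  | nil => intro acc; simp
  | cons k t ih =>
    intro acc
    simp only [List.map_cons, List.foldl_cons]
    rw [pv_insertBy_map f p q h k acc]
    exact ih _

-- the tuple comparison on counter items reduces to key comparison (keys decide)
theorem pv_before_eq (c : String → Int) (a b : String) :
    (decide (a < b) || (!decide (b < a) && decide (c a < c b))) = decide (a < b) := by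
  rcases lt_trichotomy a b with hlt | heq | hgt
  · simp [hlt]
  · subst heq; simp
  · simp [not_lt_of_gt hgt, hgt]

-- sorting the counter's items by tuple = mapping the count over the sorted key set
theorem pv_sorted2_counter (l : List String) :
    PySem.List.sorted2 (PySem.Dict.counter l).items Prod.fst Prod.snd
      = (PySem.List.sorted (PySem.Set.ofList l) (fun x => x)).map
          (fun k => (k, (PySem.List.count l k : Int))) := by
  rw [PySem.Dict.items_counter]
  simp only [PySem.List.sorted2, PySem.List.sorted, Bool.false_eq_true, if_false]
  have hcount : ∀ k, ((List.count k l : Nat) : Int) = (PySem.List.count l k : Int) := by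
    intro k; simp [PySem.List.count]
  have h := pv_foldl_insertBy_map
      (fun k => (k, ((List.count k l : Nat) : Int)))
      (fun a b => decide (a.1 < b.1) || (!decide (b.1 < a.1) && decide (a.2 < b.2)))
      (fun a b => decide (a < b))
      (by intro a b; exact pv_before_eq (fun k => ((List.count k l : Nat) : Int)) a b)
      (PySem.Set.ofList l) []
  simp only [List.map_nil] at h
  rw [h]
  simp only [hcount]

-- head of dropWhile fails the predicate
theorem pv_dropWhile_head_false {p : String → Bool} :
    ∀ (t : List String) (r : String) (rs : List String),
      t.dropWhile p = r :: rs → p r = false := by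
  intro t
  induction t with
  | nil => intro r rs h; simp [List.dropWhile] at h
  | cons a t ih =>
    intro r rs h
    by_cases hp : p a = true
    · rw [List.dropWhile_cons_of_pos hp] at h; exact ih r rs h
    · rw [List.dropWhile_cons_of_neg hp] at h
      cases h; simpa using hp

-- run-length scan of a ≤-sorted list: keys strictly increase, keys ↔ members, counts are List.count
theorem pvRuns_sorted_char (m : List String) (h : m.Pairwise (· ≤ ·)) :
    ((pvRuns m).map Prod.fst).Pairwise (· < ·) ∧
    (∀ x, x ∈ (pvRuns m).map Prod.fst ↔ x ∈ m) ∧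
    pvRuns m = ((pvRuns m).map Prod.fst).map (fun k => (k, ((List.count k m : Nat) : Int))) := by
  induction m using pvRuns.induct with
  | case1 => simp [pvRuns]
  | case2 s t ih =>
    rcases List.pairwise_cons.mp h with ⟨hle, ht⟩
    have hsplit : t.takeWhile (fun x => x == s) ++ t.dropWhile (fun x => x == s) = t :=
      List.takeWhile_append_dropWhile
    have hrun : ∀ x ∈ t.takeWhile (fun x => x == s), x = s := by
      intro x hx
      have := List.mem_takeWhile_imp hx
      simpa using this
    have hrest_pair : (t.dropWhile (fun x => x == s)).Pairwise (· ≤ ·) :=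
      ht.sublist (List.dropWhile_sublist _)
    have hrest_gt : ∀ x ∈ t.dropWhile (fun x => x == s), s < x := by
      cases hre : t.dropWhile (fun x => x == s) with
      | nil => simp
      | cons r rs =>
        have hrne : r ≠ s := by
          have := pv_dropWhile_head_false t r rs hre
          simpa using this
        have hsub : List.Sublist (r :: rs) t := hre ▸ List.dropWhile_sublist _
        have hsr : s < r := lt_of_le_of_ne (hle r (hsub.mem (by simp))) (Ne.symm hrne)
        have hpair : (r :: rs).Pairwise (· ≤ ·) := hre ▸ hrest_pair
        intro x hx
        rcases List.mem_cons.mp hx with rfl | hx'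
        · exact hsr
        · exact lt_of_lt_of_le hsr ((List.pairwise_cons.mp hpair).1 x hx')
    have hnotmem : s ∉ t.dropWhile (fun x => x == s) := fun hx => lt_irrefl s (hrest_gt s hx)
    obtain ⟨ih1, ih2, ih3⟩ := ih hrest_pair
    have hkey_mem : ∀ k ∈ (pvRuns (t.dropWhile (fun x => x == s))).map Prod.fst,
        k ∈ t.dropWhile (fun x => x == s) := fun k hk => (ih2 k).mp hk
    -- count of s in s :: t
    have hcount_s : List.count s (s :: t) = (t.takeWhile (fun x => x == s)).length + 1 := by
      have h1 : List.count s t = (t.takeWhile (fun x => x == s)).length := by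
        conv_lhs => rw [← hsplit]
        rw [List.count_append, List.count_eq_zero.mpr hnotmem,
          List.count_eq_length.mpr (fun b hb => (hrun b hb).symm)]
        omega
      rw [List.count_cons_self, h1]
    -- count of a rest-key in s :: t
    have hcount_k : ∀ k ∈ t.dropWhile (fun x => x == s),
        List.count k (s :: t) = List.count k (t.dropWhile (fun x => x == s)) := by
      intro k hk
      have hkne : k ≠ s := fun hks => lt_irrefl s (hks ▸ hrest_gt k hk)
      rw [List.count_cons_of_ne (Ne.symm hkne)]
      conv_lhs => rw [← hsplit]
      rw [List.count_append, List.count_eq_zero.mpr (fun hkr => hkne (hrun k hkr))]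
      omega
    refine ⟨?_, ?_, ?_⟩
    · rw [pvRuns]
      simp only [List.map_cons]
      exact List.pairwise_cons.mpr ⟨fun k hk => hrest_gt k (hkey_mem k hk), ih1⟩
    · intro x
      rw [pvRuns]
      simp only [List.map_cons, List.mem_cons]
      constructor
      · rintro (rfl | hx)
        · exact Or.inl rfl
        · exact Or.inr ((List.dropWhile_sublist _).mem ((ih2 x).mp hx))
      · rintro (rfl | hx')
        · exact Or.inl rfl
        · rw [← hsplit] at hx'
          rcases List.mem_append.mp hx' with hx1 | hx2
          · exact Or.inl (hrun x hx1)
          · exact Or.inr ((ih2 x).mpr hx2)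
    · rw [pvRuns]
      simp only [List.map_cons]
      congr 1
      · rw [hcount_s]; push_cast; ring_nf
      · calc pvRuns (t.dropWhile (fun x => x == s))
            = ((pvRuns (t.dropWhile (fun x => x == s))).map Prod.fst).map
                (fun k => (k, ((List.count k (t.dropWhile (fun x => x == s)) : Nat) : Int))) := ih3
          _ = ((pvRuns (t.dropWhile (fun x => x == s))).map Prod.fst).map
                (fun k => (k, ((List.count k (s :: t) : Nat) : Int))) :=
              List.map_congr_left (fun k hk => by rw [hcount_k k (hkey_mem k hk)])

theorem pvRuns_eq_map_sorted_set (l : List String) :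
    pvRuns (PySem.List.sorted l (fun x => x))
      = (PySem.List.sorted (PySem.Set.ofList l) (fun x => x)).map
          (fun k => (k, (PySem.List.count l k : Int))) := by
  have hpair : (PySem.List.sorted l (fun x => x)).Pairwise (· ≤ ·) :=
    PySem.List.sorted_pairwise l (fun x => x)
  obtain ⟨h1, h2, h3⟩ := pvRuns_sorted_char _ hpair
  have hperm : (PySem.List.sorted l (fun x => x)).Perm l := PySem.List.sorted_perm l _ _
  have hnodup : ((pvRuns (PySem.List.sorted l (fun x => x))).map Prod.fst).Nodup :=
    h1.imp ne_of_lt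
  have hpermset : ((pvRuns (PySem.List.sorted l (fun x => x))).map Prod.fst).Perm
      (PySem.Set.ofList l) := by
    refine (List.perm_ext_iff_of_nodup hnodup (PySem.Set.nodup_ofList l)).mpr ?_
    intro x
    rw [h2 x, PySem.Set.mem_ofList]
    exact hperm.mem_iff
  have hsorted : PySem.List.sorted (PySem.Set.ofList l) (fun x => x)
      = (pvRuns (PySem.List.sorted l (fun x => x))).map Prod.fst :=
    PySem.List.sorted_eq_of_perm_of_pairwise_lt _ _ _ hpermset h1
  rw [hsorted]
  conv_lhs => rw [h3]
  apply List.map_congr_left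
  intro k _
  have hc : List.count k (PySem.List.sorted l (fun x => x)) = List.count k l := hperm.count_eq k
  rw [hc]
  simp [PySem.List.count]

theorem call_state_summary_py_eq (calls : List (List (String × String))) (platform : String) :
    call_state_summary_py calls platform = call_state_summary_py_alt calls platform := by
  unfold call_state_summary_py call_state_summary_py_alt
  by_cases h : calls = []
  · simp [h]
  · simp only [if_neg h]
    congr 1
    congr 1
    rw [List.foldl_map (f := pvState)
      (g := fun d state => PySem.Dict.insert d state (PySem.Dict.getD d state 0 + 1)) |>.symm,
      PySem.Dict.foldl_insert_getD_add_one_eq_counter, pv_sorted2_counter,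
      ← pvRuns_eq_map_sorted_set]

-- ===== VERDICT (by name: the statement is the Claim_ definition above) =====
theorem call_state_summary_py_spec : Claim_equal_call_state_summary_py := by
  intro calls platform _
  unfold Spec_call_state_summary_py
  exact call_state_summary_py_eq calls platform
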